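-- pv_equiv track=rewrite | github.com/legout/duckalog | src/duckalog/ui.py | _strip_non_code
-- ===== SOURCE A (Python) =====
-- def _strip_non_code(sql: str) -> tuple[str, int]:
--     """Strip out strings/comments and count semicolons outside them."""
--     in_squote = in_dquote = in_bquote = False
--     in_line_comment = False
--     in_block_comment = False
--     cleaned_chars: list[str] = []
--     semicolons = 0
--     i = 0
--     while i < len(sql):
--         ch = sql[i]
--         nxt = sql[i + 1] if i + 1 < len(sql) else ""
--
--         if in_line_comment:
--             if ch == "\n":
--                 in_line_comment = False
--             i += 1
--             continue
--
--         if in_block_comment: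
--             if ch == "*" and nxt == "/":
--                 in_block_comment = False
--                 i += 2
--             else:
--                 i += 1
--             continue
--
--         if not (in_squote or in_dquote or in_bquote):
--             if ch == "-" and nxt == "-":
--                 in_line_comment = True
--                 i += 2
--                 continue
--             if ch == "/" and nxt == "*":
--                 in_block_comment = True
--                 i += 2
--                 continue
--             if ch == "'":
--                 in_squote = True
--                 cleaned_chars.append(" ")
--                 i += 1
--                 continue
--             if ch == '"':
--                 in_dquote = True
--                 cleaned_chars.append(" ")
--                 i += 1
--                 continue
--             if ch == "`":
--                 in_bquote = True
--                 cleaned_chars.append(" ")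
--                 i += 1
--                 continue
--             if ch == ";":
--                 semicolons += 1
--             cleaned_chars.append(ch)
--             i += 1
--             continue
--
--         # Inside a quote
--         if in_squote and ch == "'":
--             in_squote = False
--         elif in_dquote and ch == '"':
--             in_dquote = False
--         elif in_bquote and ch == "`":
--             in_bquote = False
--         i += 1
--
--     return "".join(cleaned_chars), semicolons
-- ===== SOURCE B (Python) =====
-- def _strip_non_code(sql: str) -> tuple[str, int]:
--     """Skip-ahead rewrite: jump directly to each comment/string terminator with str.find
--     instead of running a per-character boolean state machine."""
--     out = []
--     semicolons = 0
--     i = 0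
--     n = len(sql)
--     while i < n:
--         ch = sql[i]
--         if ch == "-" and sql.startswith("--", i):
--             j = sql.find("\n", i + 2)
--             i = n if j == -1 else j + 1          # newline dropped too
--         elif ch == "/" and sql.startswith("/*", i):
--             j = sql.find("*/", i + 2)
--             i = n if j == -1 else j + 2
--         elif ch in ("'", '"', "`"):
--             out.append(" ")                       # whole string collapses to one space
--             j = sql.find(ch, i + 1)
--             i = n if j == -1 else j + 1
--         else:
--             if ch == ";":
--                 semicolons += 1
--             out.append(ch)
--             i += 1
--     return "".join(out), semicolons
-- ===== Notes on version B (the rewrite author's own statement) =====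
-- stated objective: idiomatic
-- what changed: Replaces A's per-character scan driven by five boolean state flags with a skip-ahead scan that, on seeing a comment or quote opener, jumps directly past its terminator using str.find, so no in-string/in-comment state is carried between iterations.
import Mathlib
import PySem

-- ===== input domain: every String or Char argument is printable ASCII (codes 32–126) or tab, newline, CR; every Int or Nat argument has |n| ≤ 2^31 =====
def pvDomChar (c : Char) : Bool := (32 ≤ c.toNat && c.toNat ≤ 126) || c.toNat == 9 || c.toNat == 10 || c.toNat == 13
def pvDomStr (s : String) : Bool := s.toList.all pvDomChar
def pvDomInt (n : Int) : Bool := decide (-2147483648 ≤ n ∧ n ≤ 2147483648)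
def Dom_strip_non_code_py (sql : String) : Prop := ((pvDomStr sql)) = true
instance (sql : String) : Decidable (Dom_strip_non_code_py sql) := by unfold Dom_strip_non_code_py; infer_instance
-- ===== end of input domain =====

-- B replaces A's per-character five-boolean state machine by a skip-ahead scan that jumps
-- straight to each comment/string terminator (idiomatic find-and-jump); same return value.

-- ===== PORT A =====
-- A's while-loop: state (in_squote,in_dquote,in_bquote,in_line_comment,in_block_comment),
-- accumulator cleaned_chars, semicolon count; i+1/i+2 steps become rest / rest.tail.
def pvALoop (sq dq bq lc bc : Bool) (acc : List Char) (sem : Int) : List Char → List Char × Int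
  | [] => (acc, sem)
  | ch :: rest =>
    if lc then
      if ch == '\n' then pvALoop sq dq bq false bc acc sem rest
      else pvALoop sq dq bq lc bc acc sem rest
    else if bc then
      if ch == '*' && rest.head? == some '/' then pvALoop sq dq bq lc false acc sem rest.tail
      else pvALoop sq dq bq lc bc acc sem rest
    else if !(sq || dq || bq) then
      if ch == '-' && rest.head? == some '-' then pvALoop sq dq bq true bc acc sem rest.tail
      else if ch == '/' && rest.head? == some '*' then pvALoop sq dq bq lc true acc sem rest.tail
      else if ch == '\'' then pvALoop true dq bq lc bc (acc ++ [' ']) sem rest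
      else if ch == '"' then pvALoop sq true bq lc bc (acc ++ [' ']) sem rest
      else if ch == '`' then pvALoop sq dq true lc bc (acc ++ [' ']) sem rest
      else pvALoop sq dq bq lc bc (acc ++ [ch]) (if ch == ';' then sem + 1 else sem) rest
    else
      if sq && ch == '\'' then pvALoop false dq bq lc bc acc sem rest
      else if !sq && dq && ch == '"' then pvALoop sq false bq lc bc acc sem rest
      else if !sq && !dq && bq && ch == '`' then pvALoop sq dq false lc bc acc sem rest
      else pvALoop sq dq bq lc bc acc sem rest
  termination_by l => l.length
  decreasing_by all_goals simp [List.length_tail] <;> omega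

def strip_non_code_py (sql : String) : String × Int :=
  let r := pvALoop false false false false false [] 0 sql.toList
  (String.mk r.1, r.2)

-- ===== PORT B =====
-- sql.find("*/", i) on the remaining characters: index of the first "*/" pair.
def pvFindCC : List Char → Option Nat
  | [] => none
  | [_] => none
  | a :: b :: rest =>
    if a == '*' && b == '/' then some 0 else (pvFindCC (b :: rest)).map (· + 1)
  termination_by l => l.length

-- B's while-loop: at each position either jump past a comment/string (via find) or emit the char.
def pvBLoop : List Char → List Char × Int
  | [] => ([], 0)
  | ch :: rest =>
    if ch == '-' && rest.head? == some '-' then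
      match (rest.tail).findIdx? (· == '\n') with
      | none => ([], 0)
      | some j => pvBLoop ((rest.tail).drop (j + 1))
    else if ch == '/' && rest.head? == some '*' then
      match pvFindCC rest.tail with
      | none => ([], 0)
      | some j => pvBLoop ((rest.tail).drop (j + 2))
    else if ch == '\'' || ch == '"' || ch == '`' then
      match rest.findIdx? (· == ch) with
      | none => ([' '], 0)
      | some j =>
        let r := pvBLoop (rest.drop (j + 1))
        (' ' :: r.1, r.2)
    else
      let r := pvBLoop rest
      (ch :: r.1, if ch == ';' then r.2 + 1 else r.2)
  termination_by l => l.length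
  decreasing_by all_goals simp [List.length_tail, List.length_drop] <;> omega

def strip_non_code_py_alt (sql : String) : String × Int :=
  let r := pvBLoop sql.toList
  (String.mk r.1, r.2)

-- ===== PRECONDITION & SPEC =====
def Spec_strip_non_code_py (sql : String) (out : String × Int) : Prop := out = strip_non_code_py_alt sql
instance (sql : String) (out : String × Int) : Decidable (Spec_strip_non_code_py sql out) := by unfold Spec_strip_non_code_py; infer_instance

-- ===== CLAIM (what is proved, stated in full; the proofs are below) =====
def Claim_equal_strip_non_code_py : Prop := ∀ (sql : String), Dom_strip_non_code_py sql → Spec_strip_non_code_py sql (strip_non_code_py sql)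

-- ===== LEMMAS AND PROOFS =====

-- In line-comment state A just consumes until (and including) the first newline.
theorem pvA_lc (l : List Char) (acc : List Char) (sem : Int) :
    pvALoop false false false true false acc sem l =
      match l.findIdx? (· == '\n') with
      | none => (acc, sem)
      | some j => pvALoop false false false false false acc sem (l.drop (j + 1)) := by
  induction l with
  | nil => simp [pvALoop]
  | cons c rest ih =>
    by_cases h : c == '\n'
    · simp [pvALoop, h, List.findIdx?_cons]
    · simp only [pvALoop, h, if_false, Bool.false_eq_true, ite_false, ih, List.findIdx?_cons]
      cases rest.findIdx? (· == '\n') <;> simp [h]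

-- In block-comment state A consumes until (and past) the first "*/".
theorem pvA_bc (l : List Char) (acc : List Char) (sem : Int) :
    pvALoop false false false false true acc sem l =
      match pvFindCC l with
      | none => (acc, sem)
      | some j => pvALoop false false false false false acc sem (l.drop (j + 2)) := by
  induction l using pvFindCC.induct with
  | case1 => simp [pvALoop, pvFindCC]
  | case2 c => simp [pvALoop, pvFindCC]
  | case3 a b rest h => simp [pvALoop, pvFindCC, h]
  | case4 a b rest h ih =>
    simp only [pvALoop, pvFindCC, h, List.head?_cons, List.tail_cons, Bool.false_eq_true,
      ite_false, ih]
    cases pvFindCC (b :: rest) <;> simp_all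

-- In single-quote state A consumes until (and including) the closing quote.
theorem pvA_sq (l : List Char) (acc : List Char) (sem : Int) :
    pvALoop true false false false false acc sem l =
      match l.findIdx? (· == '\'') with
      | none => (acc, sem)
      | some j => pvALoop false false false false false acc sem (l.drop (j + 1)) := by
  induction l with
  | nil => simp [pvALoop]
  | cons c rest ih =>
    by_cases h : c == '\''
    · simp [pvALoop, h, List.findIdx?_cons]
    · simp only [pvALoop, h, Bool.and_false, Bool.false_eq_true, ite_false, ih,
        List.findIdx?_cons]
      cases rest.findIdx? (· == '\'') <;> simp [h]

theorem pvA_dq (l : List Char) (acc : List Char) (sem : Int) :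
    pvALoop false true false false false acc sem l =
      match l.findIdx? (· == '"') with
      | none => (acc, sem)
      | some j => pvALoop false false false false false acc sem (l.drop (j + 1)) := by
  induction l with
  | nil => simp [pvALoop]
  | cons c rest ih =>
    by_cases h : c == '"'
    · simp [pvALoop, h, List.findIdx?_cons]
    · simp only [pvALoop, h, Bool.and_false, Bool.false_eq_true, ite_false, ih,
        List.findIdx?_cons]
      cases rest.findIdx? (· == '"') <;> simp [h]

theorem pvA_bq (l : List Char) (acc : List Char) (sem : Int) :
    pvALoop false false true false false acc sem l =
      match l.findIdx? (· == '`') with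
      | none => (acc, sem)
      | some j => pvALoop false false false false false acc sem (l.drop (j + 1)) := by
  induction l with
  | nil => simp [pvALoop]
  | cons c rest ih =>
    by_cases h : c == '`'
    · simp [pvALoop, h, List.findIdx?_cons]
    · simp only [pvALoop, h, Bool.and_false, Bool.false_eq_true, ite_false, ih,
        List.findIdx?_cons]
      cases rest.findIdx? (· == '`') <;> simp [h]

-- Main invariant: the neutral-state A loop equals B's result prefixed/offset by the accumulator.
theorem pvMain (n : Nat) : ∀ (l : List Char), l.length ≤ n → ∀ (acc : List Char) (sem : Int),
    pvALoop false false false false false acc sem l =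
      (acc ++ (pvBLoop l).1, sem + (pvBLoop l).2) := by
  induction n with
  | zero =>
    intro l hl acc sem
    have : l = [] := List.length_eq_zero_iff.mp (Nat.le_zero.mp hl)
    subst this; simp [pvALoop, pvBLoop]
  | succ n ih =>
    intro l hl acc sem
    match l with
    | [] => simp [pvALoop, pvBLoop]
    | c :: rest =>
      have hrest : rest.length ≤ n := by simpa using hl
      rw [pvALoop, pvBLoop]
      simp only [Bool.false_eq_true, Bool.or_self, Bool.not_false, if_false, if_true,
        ite_true, ite_false]
      by_cases h1 : (c == '-' && rest.head? == some '-') = true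
      · simp only [h1, ite_true]
        rw [pvA_lc]
        cases hj : (rest.tail).findIdx? (· == '\n') with
        | none => simp
        | some j => exact ih _ (by simp [List.length_tail, List.length_drop]; omega) acc sem
      · simp only [h1, ite_false]
        by_cases h2 : (c == '/' && rest.head? == some '*') = true
        · simp only [h2, ite_true]
          rw [pvA_bc]
          cases hj : pvFindCC rest.tail with
          | none => simp
          | some j => exact ih _ (by simp [List.length_tail, List.length_drop]; omega) acc sem
        · simp only [h2, ite_false]
          by_cases h3 : (c == '\'' || c == '"' || c == '`') = true
          · simp only [h3, ite_true]
            rcases Bool.or_eq_true .. |>.mp h3 with h3' | hbq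
            · rcases Bool.or_eq_true .. |>.mp h3' with hsq | hdq
              · have hc : c = '\'' := by simpa using hsq
                subst hc
                simp only [beq_self_eq_true, ite_true]
                rw [pvA_sq]
                cases hj : rest.findIdx? (· == '\'') with
                | none => simp
                | some j =>
                  show pvALoop false false false false false (acc ++ [' ']) sem _ = _
                  rw [ih _ (by simp [List.length_drop]; omega)]
                  simp
              · have hc : c = '"' := by simpa using hdq
                subst hc
                have : ('"' == '\'') = false := by decide
                simp only [this, beq_self_eq_true, ite_true, ite_false, Bool.false_eq_true]
                rw [pvA_dq]
                cases hj : rest.findIdx? (· == '"') with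
                | none => simp
                | some j =>
                  show pvALoop false false false false false (acc ++ [' ']) sem _ = _
                  rw [ih _ (by simp [List.length_drop]; omega)]
                  simp
            · have hc : c = '`' := by simpa using hbq
              subst hc
              have e1 : ('`' == '\'') = false := by decide
              have e2 : ('`' == '"') = false := by decide
              simp only [e1, e2, beq_self_eq_true, ite_true, ite_false, Bool.false_eq_true]
              rw [pvA_bq]
              cases hj : rest.findIdx? (· == '`') with
              | none => simp
              | some j =>
                show pvALoop false false false false false (acc ++ [' ']) sem _ = _
                rw [ih _ (by simp [List.length_drop]; omega)]
                simp
          · have hsq : (c == '\'') = false := by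
              cases hq : (c == '\'') <;> simp_all
            have hdq : (c == '"') = false := by
              cases hq : (c == '"') <;> simp_all
            have hbq : (c == '`') = false := by
              cases hq : (c == '`') <;> simp_all
            simp only [h3, hsq, hdq, hbq, Bool.false_eq_true, ite_false]
            rw [ih _ hrest]
            by_cases hsemi : (c == ';') = true <;> simp [hsemi] <;> ring

-- ===== VERDICT (by name: the statement is the Claim_ definition above) =====
theorem strip_non_code_py_spec : Claim_equal_strip_non_code_py := by
  intro sql _
  unfold Spec_strip_non_code_py strip_non_code_py strip_non_code_py_alt
  rw [pvMain sql.toList.length sql.toList le_rfl]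
  simp
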